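-- pv_equiv track=rewrite | github.com/Saumen95/Interview-Question-python-solve | Cut the sticks.py | cut_stick
-- ===== SOURCE A (Python) =====
-- def cut_stick(length):
--     result = []
--     while length:
--         result.append(len(length))
--         m = min(length)
--
--         new_length = []
--
--         for i in range (len(length)):
--             length[i] -= m
--
--             if length[i] != 0:
--                 new_length.append(length[i])
--
--         length = new_length
--
--     return result
-- ===== SOURCE B (Python) =====
-- def cut_stick(length):
--     n = len(length)
--     result = []
--     prev = None
--     for v in sorted(length):
--         if v != prev:
--             result.append(n)
--             prev = v
--         n -= 1
--     return result
-- ===== Notes on version B (the rewrite author's own statement) =====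
-- stated objective: faster
-- what changed: replaces the repeated min-and-rebuild while loop (O(n) passes, each scanning the list) with a single sort followed by one linear scan that emits the remaining count at each new distinct value
import Mathlib
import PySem

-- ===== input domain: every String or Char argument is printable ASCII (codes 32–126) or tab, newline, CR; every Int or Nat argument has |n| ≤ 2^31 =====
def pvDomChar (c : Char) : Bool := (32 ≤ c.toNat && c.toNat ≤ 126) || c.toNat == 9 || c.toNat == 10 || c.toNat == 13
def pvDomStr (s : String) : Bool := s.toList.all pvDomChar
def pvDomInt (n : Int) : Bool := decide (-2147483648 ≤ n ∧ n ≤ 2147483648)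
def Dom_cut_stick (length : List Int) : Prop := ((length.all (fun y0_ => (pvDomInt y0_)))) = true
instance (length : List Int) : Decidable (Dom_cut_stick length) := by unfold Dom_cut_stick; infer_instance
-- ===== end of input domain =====

-- B replaces A's repeated min-and-rebuild passes by one sort plus a single scan (asymptotically
-- faster); note A also mutates its argument in place (first pass subtracts the min) — the
-- equivalence proved here is about the return value only.

-- ===== PORT A =====
-- helper fact A's termination proof cites: the inner for-loop builds the filtered, shifted list
theorem pvStepFold (l : List Int) (m : Int) (acc : List Int) :
    l.foldl (fun a x => if x - m ≠ 0 then a ++ [x - m] else a) acc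
      = acc ++ (l.filter (fun x => x ≠ m)).map (fun x => x - m) := by
  induction l generalizing acc with
  | nil => simp
  | cons v t ih =>
      rw [List.foldl_cons]
      by_cases h : v = m
      · subst h
        rw [if_neg (by simp), ih, List.filter_cons]
        simp
      · have hz : v - m ≠ 0 := sub_ne_zero.mpr h
        rw [if_pos hz, ih, List.filter_cons]
        simp [h]

def cut_stick (length : List Int) : List Int :=
  if _hne : length = [] then []
  else
    match _hm : PySem.List.min? length (fun x => x) with
    | none => []  -- unreachable: min? is none only on [] (totality guard)
    | some m =>
      let new_length := (PySem.List.pyRange 0 (length.length : Int) 1).foldl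
          (fun acc i =>
            if PySem.List.pyGetD length i 0 - m ≠ 0
            then acc ++ [PySem.List.pyGetD length i 0 - m] else acc) []
      (length.length : Int) :: cut_stick new_length
  termination_by length.length
  decreasing_by
    have h1 := PySem.List.foldl_pyRange_zero_pyGetD' length 0
        (fun a x => if x - m ≠ 0 then a ++ [x - m] else a) ([] : List Int)
    rw [pvStepFold, List.nil_append] at h1
    have hm' : m ∈ length := PySem.List.min?_mem _hm
    have hlt : ((length.filter (fun x => x ≠ m)).map (fun x => x - m)).length < length.length := by
      rw [List.length_map]
      exact List.length_filter_lt_length_iff_exists.mpr ⟨m, hm', by simp⟩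
    exact lt_of_eq_of_lt (congrArg List.length h1) hlt

-- ===== PORT B =====
def cut_stick_alt (length : List Int) : List Int :=
  ((PySem.List.sorted length (fun x => x) false).foldl
      (fun st v =>
        if some v ≠ st.2.2 then (st.1 - 1, st.2.1 ++ [st.1], some v)
        else (st.1 - 1, st.2.1, st.2.2))
      ((length.length : Int), ([], none))).2.1

-- ===== PRECONDITION & SPEC =====
def Spec_cut_stick (length : List Int) (out : List Int) : Prop := out = cut_stick_alt length
instance (length : List Int) (out : List Int) : Decidable (Spec_cut_stick length out) := by unfold Spec_cut_stick; infer_instance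

-- ===== CLAIM (what is proved, stated in full; the proofs are below) =====
def Claim_equal_cut_stick : Prop := ∀ (length : List Int), Dom_cut_stick length → Spec_cut_stick length (cut_stick length)

-- ===== LEMMAS AND PROOFS =====

-- B's fold function, named for the proofs
def pvF : Int × List Int × Option Int → Int → Int × List Int × Option Int :=
  fun st v =>
    if some v ≠ st.2.2 then (st.1 - 1, st.2.1 ++ [st.1], some v)
    else (st.1 - 1, st.2.1, st.2.2)

theorem pvF_eq (st : Int × List Int × Option Int) (v : Int) :
    pvF st v = if some v = st.2.2 then (st.1 - 1, st.2.1, st.2.2)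
               else (st.1 - 1, st.2.1 ++ [st.1], some v) := by
  simp only [pvF, ne_eq, ite_not]

theorem pvAlt_eq (l : List Int) :
    cut_stick_alt l
      = ((PySem.List.sorted l (fun x => x) false).foldl pvF ((l.length : Int), ([], none))).2.1 := rfl

-- the output component accumulates by append
theorem pvFold_res (s : List Int) : ∀ (n : Int) (res : List Int) (p : Option Int),
    (s.foldl pvF (n, res, p)).2.1 = res ++ (s.foldl pvF (n, [], p)).2.1 := by
  induction s with
  | nil => intro n res p; simp
  | cons v t ih =>
      intro n res p
      by_cases h : some v = p
      · simp only [List.foldl_cons, pvF_eq, h, if_pos]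
        exact ih (n - 1) res p
      · simp only [List.foldl_cons, pvF_eq, h, if_false]
        rw [ih (n - 1) (res ++ [n]) (some v), ih (n - 1) ([] ++ [n]) (some v)]
        simp

-- a previous value absent from the head behaves like no previous value (on the output)
theorem pvFold_skip (s : List Int) (q : Int) (n : Int)
    (h : s.head? ≠ some q) :
    (s.foldl pvF (n, [], some q)).2.1 = (s.foldl pvF (n, [], none)).2.1 := by
  cases s with
  | nil => rfl
  | cons v t =>
      have hv : ¬ some v = some q := by intro hq; exact h (by simp [List.head?]; exact Option.some_inj.mp hq)
      have hn : ¬ some v = (none : Option Int) := by simp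
      simp only [List.foldl_cons, pvF_eq, hv, hn, ite_false]

-- repeated copies of the previous value are skipped
theorem pvFold_rep (m : Int) : ∀ (j : Nat) (n : Int) (res : List Int),
    (List.replicate j m).foldl pvF (n, res, some m) = (n - j, res, some m) := by
  intro j
  induction j with
  | zero => intro n res; simp
  | succ k ih =>
      intro n res
      simp only [List.replicate_succ, List.foldl_cons, pvF_eq, if_pos]
      rw [ih (n - 1) res]
      congr 1
      push_cast
      ring

-- shifting every element by a constant does not change the emitted counts
theorem pvFold_shift (m : Int) : ∀ (t : List Int) (n : Int) (p : Option Int),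
    ((t.map (fun x => x - m)).foldl pvF (n, [], Option.map (fun x => x - m) p)).2.1
      = (t.foldl pvF (n, [], p)).2.1 := by
  intro t
  induction t with
  | nil => intro n p; simp
  | cons v s ih =>
      intro n p
      have hiff : (some (v - m) = Option.map (fun x => x - m) p) ↔ (some v = p) := by
        cases p with
        | none => simp
        | some q => simp [sub_left_inj]
      by_cases h : some v = p
      · have h' : some (v - m) = Option.map (fun x => x - m) p := hiff.mpr h
        simp only [List.map_cons, List.foldl_cons, pvF_eq, h, h', if_pos]
        rw [← h', Option.some_inj] at h'
        have := ih (n - 1) p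
        rw [← h]
        simpa [← h] using ih (n - 1) (some v)
      · have h' : ¬ some (v - m) = Option.map (fun x => x - m) p := fun hc => h (hiff.mp hc)
        simp only [List.map_cons, List.foldl_cons, pvF_eq, h, h', ite_false]
        rw [pvFold_res (s.map (fun x => x - m)) (n - 1) ([] ++ [n]) (some (v - m)),
            pvFold_res s (n - 1) ([] ++ [n]) (some v)]
        have := ih (n - 1) (some v)
        simp only [Option.map_some] at this
        rw [this]

-- decomposition of the sorted list at the minimum
theorem pvSorted_decomp (l : List Int) (m : Int)
    (hm : PySem.List.min? l (fun x => x) = some m) :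
    PySem.List.sorted l (fun x => x) false
      = List.replicate (l.count m) m
        ++ PySem.List.sorted (l.filter (fun x => x ≠ m)) (fun x => x) false := by
  have hmin := PySem.List.min?_isMin hm
  have h1 : (PySem.List.sorted (l.filter (fun x => x ≠ m)) (fun x => x) false).Perm
      (l.filter (fun x => x ≠ m)) := PySem.List.sorted_perm _ _ _
  have h2 : (l.filter (fun x => x == m)).Perm (List.replicate (l.count m) m) := by
    rw [List.filter_beq]
  have h3 : (l.filter (fun x => x == m) ++ l.filter (fun x => !(x == m))).Perm l :=
    List.filter_append_perm _ l
  have h4 : (fun x : Int => decide (x ≠ m)) = (fun x : Int => !(x == m)) := by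
    funext x; by_cases hx : x = m <;> simp [hx]
  have hperm : (List.replicate (l.count m) m
      ++ PySem.List.sorted (l.filter (fun x => x ≠ m)) (fun x => x) false).Perm l := by
    refine List.Perm.trans (List.Perm.append h2.symm ?_) h3
    rw [← h4]
    exact h1
  have hpw : (List.replicate (l.count m) m
      ++ PySem.List.sorted (l.filter (fun x => x ≠ m)) (fun x => x) false).Pairwise
        (fun a b => a ≤ b) := by
    rw [List.pairwise_append]
    refine ⟨List.pairwise_replicate.mpr (Or.inr le_rfl), PySem.List.sorted_pairwise _ _, ?_⟩
    intro a ha b hb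
    have ham : a = m := List.eq_of_mem_replicate ha
    have hbl : b ∈ l := by
      have hb' : b ∈ l.filter (fun x => x ≠ m) := (PySem.List.sorted_perm _ _ _).mem_iff.mp hb
      exact List.mem_of_mem_filter hb'
    exact ham ▸ hmin b hbl
  exact PySem.List.sorted_id_eq_of_perm_of_pairwise l _ hperm hpw

theorem pvSorted_step (l : List Int) (m : Int) :
    PySem.List.sorted ((l.filter (fun x => x ≠ m)).map (fun x => x - m)) (fun x => x) false
      = (PySem.List.sorted (l.filter (fun x => x ≠ m)) (fun x => x) false).map (fun x => x - m) := by
  apply PySem.List.sorted_id_eq_of_perm_of_pairwise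
  · exact List.Perm.map _ (PySem.List.sorted_perm _ _ _)
  · exact List.Pairwise.map _ (fun a b h => by omega) (PySem.List.sorted_pairwise _ _)

-- B's recursion step
theorem pvAlt_step (l : List Int) (m : Int)
    (hm : PySem.List.min? l (fun x => x) = some m) :
    cut_stick_alt l
      = (l.length : Int) :: cut_stick_alt ((l.filter (fun x => x ≠ m)).map (fun x => x - m)) := by
  have hmem : m ∈ l := PySem.List.min?_mem hm
  have hd := pvSorted_decomp l m hm
  set t := PySem.List.sorted (l.filter (fun x => x ≠ m)) (fun x => x) false with ht
  obtain ⟨k', hk⟩ : ∃ k', l.count m = k' + 1 := by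
    have : 0 < l.count m := List.count_pos_iff.mpr hmem
    exact ⟨l.count m - 1, by omega⟩
  -- lengths
  have hlen : l.length = (k' + 1) + t.length := by
    have := congrArg List.length hd
    rw [PySem.List.length_sorted] at this
    simpa [hk] using this
  have htne : t.head? ≠ some m := by
    cases htt : t with
    | nil => simp
    | cons x xs =>
        have hx : x ∈ t := by rw [htt]; exact List.mem_cons_self
        have hx' : x ∈ l.filter (fun y => y ≠ m) := (PySem.List.sorted_perm _ _ _).mem_iff.mp hx
        have : x ≠ m := by
          have := List.of_mem_filter hx'
          simpa using this
        simp [this]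
  -- left side
  rw [pvAlt_eq l, hd, hk, List.replicate_succ, List.cons_append, List.foldl_cons]
  have hstep1 : pvF ((l.length : Int), [], none) m
      = ((l.length : Int) - 1, [] ++ [(l.length : Int)], some m) := by
    simp [pvF_eq]
  rw [hstep1, List.foldl_append, pvFold_rep m k' ((l.length : Int) - 1) ([] ++ [(l.length : Int)])]
  rw [pvFold_res t ((l.length : Int) - 1 - (k' : Int)) ([] ++ [(l.length : Int)]) (some m)]
  rw [pvFold_skip t m ((l.length : Int) - 1 - (k' : Int)) htne]
  -- right side
  rw [pvAlt_eq ((l.filter (fun x => x ≠ m)).map (fun x => x - m))]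
  rw [pvSorted_step l m, ← ht]
  have hlen2 : (((l.filter (fun x => x ≠ m)).map (fun x => x - m)).length : Int) = (t.length : Int) := by
    rw [List.length_map]
    have := (PySem.List.sorted_perm (l.filter (fun x => x ≠ m)) (fun x => x) false).length_eq
    rw [← ht] at this
    exact_mod_cast this.symm
  rw [hlen2]
  have hn : ((l.length : Int) - 1 - (k' : Int)) = (t.length : Int) := by
    rw [hlen]; push_cast; ring
  rw [hn]
  have hshift := pvFold_shift m t (t.length : Int) none
  simp only [Option.map_none] at hshift
  rw [hshift]
  simp

-- A's recursion step
theorem pvA_step (l : List Int) (m : Int) (hne : ¬ l = [])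
    (hm : PySem.List.min? l (fun x => x) = some m) :
    cut_stick l
      = (l.length : Int) :: cut_stick ((l.filter (fun x => x ≠ m)).map (fun x => x - m)) := by
  conv_lhs => unfold cut_stick
  rw [dif_neg hne]
  split
  · next h => rw [hm] at h; cases h
  · next m' h =>
      rw [hm] at h
      injection h with h
      subst h
      have h1 := PySem.List.foldl_pyRange_zero_pyGetD' l 0
          (fun a x => if x - m ≠ 0 then a ++ [x - m] else a) ([] : List Int)
      rw [pvStepFold, List.nil_append] at h1
      exact congrArg (fun xs => ((l.length : Int) :: cut_stick xs)) h1

theorem pvMain : ∀ (l : List Int), cut_stick l = cut_stick_alt l := by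
  intro l
  induction hn : l.length using Nat.strong_induction_on generalizing l with
  | _ n ih =>
    by_cases hne : l = []
    · subst hne
      have hA : cut_stick [] = [] := by unfold cut_stick; rfl
      rw [hA]; rfl
    · obtain ⟨m, hm⟩ : ∃ m, PySem.List.min? l (fun x => x) = some m := by
        cases hmm : PySem.List.min? l (fun x => x) with
        | none => exact absurd ((PySem.List.min?_eq_none_iff l _).mp hmm) hne
        | some m => exact ⟨m, rfl⟩
      rw [pvA_step l m hne hm, pvAlt_step l m hm]
      congr 1
      have hm' : m ∈ l := PySem.List.min?_mem hm
      have hlt : ((l.filter (fun x => x ≠ m)).map (fun x => x - m)).length < n := by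
        rw [List.length_map, ← hn]
        exact List.length_filter_lt_length_iff_exists.mpr ⟨m, hm', by simp⟩
      exact ih _ hlt _ rfl

-- ===== VERDICT (by name: the statement is the Claim_ definition above) =====
theorem cut_stick_spec : Claim_equal_cut_stick := by
  intro l _
  unfold Spec_cut_stick
  exact pvMain l
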